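-- pv_equiv track=rewrite | github.com/VaHiX/CodeForces | Python/ByRound/1895/1895_C_Torn_Lucky_Ticket.py | solve
-- ===== SOURCE A (Python) =====
-- from collections import defaultdict
--
-- MAX_DIGITS = 9
--
-- def solve(N, L):
--
--     # Initialize data structures for tracking whole and partial sums
--     whole = [defaultdict(int) for _ in range(1 + MAX_DIGITS)]
--     part = [defaultdict(int) for _ in range(1 + MAX_DIGITS)]
--
--     for piece in L:
--         s = len(piece)
--         prefix = [0]
--
--         # Build prefix sum array for current piece
--         for c in piece:
--             prefix.append(prefix[-1] + ord(c) - ord("0"))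
--
--         total_sum = prefix[s]
--
--         # Store the total sum for the full piece
--         whole[s][total_sum] += 1
--
--         # Handle all possible splits (for odd lengths, there's a middle element)
--         part[s][total_sum] += 1
--
--         # For each valid split point, update the partial sums
--         for k in range(1, (s + 1) // 2):
--             # Update the counts for the adjusted difference between halves
--             part[s - 2 * k][total_sum - 2 * prefix[k]] += 1
--             part[s - 2 * k][2 * prefix[s - k] - total_sum] += 1
--
--     result = 0
--
--     # For each possible length, accumulate valid combinations
--     for length in range(1, 1 + MAX_DIGITS):
--         for sum_value, count in whole[length].items():
--             # Multiply the frequency of current sum with matching sums from part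
--             result += count * part[length][sum_value]
--
--     return result
-- ===== SOURCE B (Python) =====
-- def digit_sum(t):
--     return sum(ord(c) - ord("0") for c in t)
--
--
-- def solve(N, L):
--     # Direct brute force: try every ordered pair of (non-empty) pieces, self-pairs
--     # included, glue them, and check the glued ticket is "lucky" (even length,
--     # both halves with equal digit sums).
--     count = 0
--     for x in L:
--         if not x:
--             continue
--         for y in L:
--             if not y:
--                 continue
--             s = x + y
--             if len(s) % 2 == 0:
--                 h = len(s) // 2
--                 if digit_sum(s[:h]) == digit_sum(s[h:]):
--                     count += 1
--     return count
-- ===== Notes on version B (the rewrite author's own statement) =====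
-- stated objective: simpler
-- what changed: Replaces A's per-piece prefix-sum bookkeeping in length-indexed defaultdict tables (whole/part) with a direct all-ordered-pairs scan that glues the two pieces and compares the digit sums of the two halves; Pre_ excludes only inputs with a piece longer than 9 characters, on which A raises IndexError.
import Mathlib
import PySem

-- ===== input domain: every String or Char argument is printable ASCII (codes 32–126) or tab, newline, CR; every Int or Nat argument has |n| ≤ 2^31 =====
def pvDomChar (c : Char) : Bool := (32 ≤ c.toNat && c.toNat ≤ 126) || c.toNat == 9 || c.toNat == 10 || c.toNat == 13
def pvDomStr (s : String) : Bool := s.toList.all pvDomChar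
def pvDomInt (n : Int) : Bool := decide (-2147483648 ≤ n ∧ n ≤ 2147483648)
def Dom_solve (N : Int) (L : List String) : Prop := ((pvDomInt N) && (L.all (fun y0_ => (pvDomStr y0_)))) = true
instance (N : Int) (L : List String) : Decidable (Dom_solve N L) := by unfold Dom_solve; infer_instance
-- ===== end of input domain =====

-- B replaces A's prefix-sum/defaultdict bookkeeping with a direct all-ordered-pairs brute force (simpler, not faster).

-- ===== PORT A =====
def solve (N : Int) (L : List String) : Int :=
  let wp := L.foldl
    (fun (wp : List (PySem.Dict Int Int) × List (PySem.Dict Int Int)) piece =>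
      let cs := piece.toList
      let s : Nat := cs.length
      -- prefix = [0]; for c in piece: prefix.append(prefix[-1] + ord(c) - ord("0"))
      let prefix_ := cs.foldl
        (fun pre c => pre ++ [PySem.List.pyGetD pre (-1) 0 + ((c.toNat : Int) - 48)])
        ([0] : List Int)
      let total := PySem.List.pyGetD prefix_ (s : Int) 0
      -- whole[s][total_sum] += 1 ; part[s][total_sum] += 1
      let whole := wp.1.modify s (fun d => d.modify total 0 (· + 1))
      let part := wp.2.modify s (fun d => d.modify total 0 (· + 1))
      -- for k in range(1, (s + 1) // 2): two part updates; index s - 2*k is ≥ 1 there, so .toNat is exact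
      let part := (PySem.List.pyRange 1 (PySem.Int.floordiv ((s : Int) + 1) 2) 1).foldl
        (fun part k =>
          let part := part.modify ((s : Int) - 2 * k).toNat
            (fun d => d.modify (total - 2 * PySem.List.pyGetD prefix_ k 0) 0 (· + 1))
          part.modify ((s : Int) - 2 * k).toNat
            (fun d => d.modify (2 * PySem.List.pyGetD prefix_ ((s : Int) - k) 0 - total) 0 (· + 1)))
        part
      (whole, part))
    (List.replicate 10 PySem.Dict.empty, List.replicate 10 PySem.Dict.empty)
  -- for length in range(1, 10): for sum_value, count in whole[length].items(): result += count * part[length][sum_value]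
  (PySem.List.pyRange 1 10 1).foldl
    (fun result length =>
      (PySem.List.pyGetD wp.1 length PySem.Dict.empty).items.foldl
        (fun result sv => result + sv.2 * (PySem.List.pyGetD wp.2 length PySem.Dict.empty).getD sv.1 0)
        result)
    0

-- ===== PORT B =====
-- digit_sum(t) = sum(ord(c) - ord("0") for c in t)
def dsum (cs : List Char) : Int := (cs.map (fun c => ((c.toNat : Int) - 48))).sum

def solve_alt (N : Int) (L : List String) : Int :=
  L.foldl (fun count x =>
    if x.toList = [] then count          -- if not x: continue
    else L.foldl (fun count y =>
      if y.toList = [] then count        -- if not y: continue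
      else
        let s := x.toList ++ y.toList
        if s.length % 2 = 0 then
          -- h = len(s) // 2; s[:h] / s[h:] are take h / drop h (h is in range)
          let h := s.length / 2
          if dsum (s.take h) = dsum (s.drop h) then count + 1 else count
        else count) count) 0

-- ===== PRECONDITION & SPEC =====
-- Pre_ excludes exactly the inputs with a piece longer than 9 characters, on which A raises
-- IndexError (whole[s] with s > 9).
def Pre_solve (N : Int) (L : List String) : Prop :=
  ∀ s ∈ L, s.toList.length ≤ 9
instance (N : Int) (L : List String) : Decidable (Pre_solve N L) := by unfold Pre_solve; infer_instance

def pvWitness_solve : Int × List String := (3, ["12", "3", "2130"])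

def Spec_solve (N : Int) (L : List String) (out : Int) : Prop := out = solve_alt N L
instance (N : Int) (L : List String) (out : Int) : Decidable (Spec_solve N L out) := by unfold Spec_solve; infer_instance

-- ===== CLAIM (what is proved, stated in full; the proofs are below) =====
def Claim_equal_solve : Prop := ∀ (N : Int) (L : List String), Dom_solve N L → Pre_solve N L → Spec_solve N L (solve N L)

-- ===== LEMMAS AND PROOFS =====

-- digit sum of a prefix
def dsT (y : List Char) (k : Nat) : Int := dsum (y.take k)

-- the (length, value) "part" entries A derives from one piece y
def pe (y : List Char) : List (Nat × Int) :=
  (y.length, dsum y) ::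
  (List.range ((y.length + 1) / 2 - 1)).flatMap (fun j =>
    [(y.length - 2 * (j + 1), dsum y - 2 * dsT y (j + 1)),
     (y.length - 2 * (j + 1), 2 * dsT y (y.length - (j + 1)) - dsum y)])

-- the 0/1 indicator B sums
def luckyI (x y : List Char) : Int :=
  if (x.length + y.length) % 2 = 0 ∧
      dsum ((x ++ y).take ((x.length + y.length) / 2)) = dsum ((x ++ y).drop ((x.length + y.length) / 2))
    then 1 else 0

-- B's summand including its empty-piece guards
def luckyN (x y : List Char) : Int :=
  if x = [] then 0 else if y = [] then 0 else luckyI x y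

theorem dsum_append (a b : List Char) : dsum (a ++ b) = dsum a + dsum b := by
  simp [dsum]

theorem sum_map_ite_mem {α : Type} [DecidableEq α] (u : List α) (k0 : α) (h : α → Int)
    (hn : u.Nodup) (hm : k0 ∈ u) :
    (u.map (fun k => if k = k0 then h k else 0)).sum = h k0 := by
  induction u with
  | nil => cases hm
  | cons a t ih =>
    rcases List.mem_cons.mp hm with rfl | hmem
    · have hz : (t.map (fun k => if k = k0 then h k else 0)).sum = 0 := by
        rw [List.map_congr_left (g := fun _ => (0 : Int)), PySem.List.sum_map_const_int, mul_zero]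
        intro b hb
        have : b ≠ k0 := fun hba => (List.nodup_cons.mp hn).1 (hba ▸ hb)
        simp [this]
      simp [hz]
    · have hne : a ≠ k0 := fun hak => (List.nodup_cons.mp hn).1 (hak ▸ hmem)
      simp only [List.map_cons, List.sum_cons, if_neg hne, zero_add]
      exact ih (List.nodup_cons.mp hn).2 hmem

theorem sum_swap {α β : Type} (P : List α) (Q : List β) (f : α → β → Int) :
    (P.map (fun x => (Q.map (f x)).sum)).sum = (Q.map (fun y => (P.map (fun x => f x y)).sum)).sum := by
  induction P with
  | nil => simp
  | cons a t ih =>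
    simp only [List.map_cons, List.sum_cons, ih]
    rw [← PySem.List.sum_map_add_int]

-- Σ_{k ∈ dedup} count(k, ws) * g k = Σ_{w ∈ ws} g w
theorem sum_count_dedup (u ws : List Int) (g : Int → Int) (hn : u.Nodup) (hc : ∀ x ∈ ws, x ∈ u) :
    (u.map (fun k => ((ws.count k : Int)) * g k)).sum = (ws.map g).sum := by
  induction ws with
  | nil =>
    simp only [List.count_nil, Int.natCast_zero, zero_mul, List.map_nil, List.sum_nil]
    rw [PySem.List.sum_map_const_int (c := 0)]; ring
  | cons w t ih =>
    have h1 : ∀ k ∈ u, ((List.count k (w :: t) : Int)) * g k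
        = (t.count k : Int) * g k + (if k = w then g k else 0) := by
      intro k _
      rw [List.count_cons]
      by_cases hkw : k = w
      · simp [hkw]; ring
      · have : (w == k) = false := by simp [Ne.symm hkw]
        simp [this, hkw]
    rw [List.map_congr_left h1, PySem.List.sum_map_add_int,
      ih (fun x hx => hc x (List.mem_cons_of_mem _ hx)),
      sum_map_ite_mem u w g hn (hc w (List.mem_cons_self ..))]
    simp [add_comm]

-- ==== the A-side prefix list ====

theorem buildPrefix_eq (cs : List Char) :
    cs.foldl (fun pre c => pre ++ [PySem.List.pyGetD pre (-1) 0 + ((c.toNat : Int) - 48)]) ([0] : List Int)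
      = (List.range (cs.length + 1)).map (dsT cs) := by
  induction cs using List.reverseRecOn with
  | nil => simp [dsT, dsum]
  | append_singleton t c ih =>
    rw [List.foldl_append, ih]
    simp only [List.foldl_cons, List.foldl_nil]
    have hlast : PySem.List.pyGetD ((List.range (t.length + 1)).map (dsT t)) (-1) 0 = dsT t t.length := by
      rw [List.range_succ, List.map_append, List.map_singleton, PySem.List.pyGetD_neg_one_append_singleton]
    rw [hlast]
    have h1 : ∀ a ∈ List.range (t.length + 1), dsT t a = dsT (t ++ [c]) a := by
      intro a ha
      have : a ≤ t.length := by have := List.mem_range.mp ha; omega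
      simp [dsT, List.take_append_of_le_length this]
    have h2 : dsT t t.length + ((c.toNat : Int) - 48) = dsT (t ++ [c]) (t.length + 1) := by
      simp [dsT, dsum, List.take_of_length_le]
    rw [List.map_congr_left h1, h2]
    rw [List.length_append, List.length_singleton, List.range_succ (n := t.length + 1), List.map_append,
      List.map_singleton]

theorem prefix_get (cs : List Char) (k : Nat) (hk : k ≤ cs.length) :
    PySem.List.pyGetD ((List.range (cs.length + 1)).map (dsT cs)) (k : Int) 0 = dsT cs k := by
  rw [PySem.List.pyGetD_natCast, PySem.List.getD_map_range _ _ _ _ (by omega)]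

-- ==== updating the (range 10).map counter state ====

def incr (part : List (PySem.Dict Int Int)) (e : Nat × Int) : List (PySem.Dict Int Int) :=
  part.modify e.1 (fun d => d.modify e.2 0 (· + 1))

theorem incr_rangemap (E : Nat → List Int) (i : Nat) (_hi : i < 10) (v : Int) :
    incr ((List.range 10).map (fun ℓ => PySem.Dict.counter (E ℓ))) (i, v)
      = (List.range 10).map (fun ℓ => PySem.Dict.counter (if ℓ = i then E ℓ ++ [v] else E ℓ)) := by
  apply List.ext_getElem
  · simp [incr]
  · intro j hj hj'
    simp only [incr, List.getElem_modify, List.getElem_map, List.getElem_range] at *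
    by_cases hij : i = j
    · subst hij
      simp [PySem.Dict.counter_append_singleton]
    · have hji : j ≠ i := fun h => hij h.symm
      simp [hij, hji]

theorem applyEntries (es : List (Nat × Int)) (E : Nat → List Int) (hb : ∀ e ∈ es, e.1 < 10) :
    es.foldl incr ((List.range 10).map (fun ℓ => PySem.Dict.counter (E ℓ)))
      = (List.range 10).map (fun ℓ =>
          PySem.Dict.counter (E ℓ ++ (es.filter (fun e => e.1 == ℓ)).map (·.2))) := by
  induction es generalizing E with
  | nil => simp
  | cons e t ih =>
    have he : e.1 < 10 := hb e (List.mem_cons_self ..)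
    simp only [List.foldl_cons]
    rw [show incr ((List.range 10).map (fun ℓ => PySem.Dict.counter (E ℓ))) e
        = (List.range 10).map (fun ℓ => PySem.Dict.counter ((fun ℓ => if ℓ = e.1 then E ℓ ++ [e.2] else E ℓ) ℓ)) from by
        rw [← incr_rangemap E e.1 he e.2]]
    rw [ih _ (fun x hx => hb x (List.mem_cons_of_mem _ hx))]
    apply List.map_congr_left
    intro ℓ _
    congr 1
    by_cases hle : ℓ = e.1
    · subst hle
      simp
    · have heq : (e.1 == ℓ) = false := by
        have h2 : e.1 ≠ ℓ := fun h => hle h.symm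
        simp [h2]
      simp [heq, hle]

-- two interleaved updates per loop index become a fold over the flattened entry list
theorem foldl_two_incr {α : Type} (ks : List α) (f g : α → Nat × Int) (init : List (PySem.Dict Int Int)) :
    ks.foldl (fun part k => incr (incr part (f k)) (g k)) init
      = (ks.flatMap (fun k => [f k, g k])).foldl incr init := by
  induction ks generalizing init with
  | nil => rfl
  | cons a t ih => simp [ih]

-- ==== characterisation of A ====

def xss (L : List String) : List (List Char) := L.map String.toList

def evals (ℓ : Nat) (xs : List (List Char)) : List Int :=
  ((xs.flatMap pe).filter (fun e => e.1 == ℓ)).map (·.2)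

def wvals (ℓ : Nat) (xs : List (List Char)) : List Int :=
  (xs.filter (fun x => x.length == ℓ)).map dsum

theorem pe_bounds (y : List Char) (hy : y.length ≤ 9) : ∀ e ∈ pe y, e.1 < 10 := by
  intro e he
  unfold pe at he
  rcases List.mem_cons.mp he with rfl | hmem
  · omega
  · obtain ⟨j, _, hj⟩ := List.mem_flatMap.mp hmem
    have : e.1 = y.length - 2 * (j + 1) := by
      rcases List.mem_cons.mp hj with h | h
      · rw [h]
      · rw [List.mem_singleton.mp h]
    omega

theorem wvals_cons (ℓ : Nat) (a : List Char) (r : List (List Char)) :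
    wvals ℓ [a] ++ wvals ℓ r = wvals ℓ (a :: r) := by
  unfold wvals
  rw [List.filter_cons, List.filter_cons, List.filter_nil]
  by_cases hq : (a.length == ℓ) = true
  · simp [hq]
  · simp [hq]

theorem evals_cons (ℓ : Nat) (a : List Char) (r : List (List Char)) :
    evals ℓ [a] ++ evals ℓ r = evals ℓ (a :: r) := by
  unfold evals
  simp [List.flatMap_cons, List.filter_append]

theorem dsT_length (y : List Char) : dsT y y.length = dsum y := by
  simp [dsT]

-- one piece's processing turns the counter-tables state into the counter of the extended lists
theorem piece_step (p : String) (W E : Nat → List Int) (hp9 : p.toList.length ≤ 9) :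
    (fun (wp : List (PySem.Dict Int Int) × List (PySem.Dict Int Int)) piece =>
      let cs := piece.toList
      let s : Nat := cs.length
      let prefix_ := cs.foldl
        (fun pre c => pre ++ [PySem.List.pyGetD pre (-1) 0 + ((c.toNat : Int) - 48)])
        ([0] : List Int)
      let total := PySem.List.pyGetD prefix_ (s : Int) 0
      let whole := wp.1.modify s (fun d => d.modify total 0 (· + 1))
      let part := wp.2.modify s (fun d => d.modify total 0 (· + 1))
      let part := (PySem.List.pyRange 1 (PySem.Int.floordiv ((s : Int) + 1) 2) 1).foldl
        (fun part k =>
          let part := part.modify ((s : Int) - 2 * k).toNat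
            (fun d => d.modify (total - 2 * PySem.List.pyGetD prefix_ k 0) 0 (· + 1))
          part.modify ((s : Int) - 2 * k).toNat
            (fun d => d.modify (2 * PySem.List.pyGetD prefix_ ((s : Int) - k) 0 - total) 0 (· + 1)))
        part
      (whole, part))
      ((List.range 10).map (fun ℓ => PySem.Dict.counter (W ℓ)),
       (List.range 10).map (fun ℓ => PySem.Dict.counter (E ℓ)))
      p
    = ((List.range 10).map (fun ℓ => PySem.Dict.counter (W ℓ ++ wvals ℓ [p.toList])),
       (List.range 10).map (fun ℓ => PySem.Dict.counter (E ℓ ++ evals ℓ [p.toList]))) := by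
  simp only [buildPrefix_eq]
  rw [prefix_get p.toList p.toList.length (le_refl _), dsT_length]
  have hs10 : p.toList.length < 10 := by omega
  refine Prod.ext ?_ ?_
  · show incr ((List.range 10).map (fun ℓ => PySem.Dict.counter (W ℓ)))
        (p.toList.length, dsum p.toList)
      = (List.range 10).map (fun ℓ => PySem.Dict.counter (W ℓ ++ wvals ℓ [p.toList]))
    rw [incr_rangemap W _ hs10]
    apply List.map_congr_left
    intro ℓ _
    congr 1
    unfold wvals
    by_cases hls : ℓ = p.toList.length
    · subst hls
      simp
    · have hls' : ¬ ℓ = p.length := by rw [← String.length_toList]; exact hls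
      have hbe : (p.length == ℓ) = false := by
        have h2 : p.length ≠ ℓ := fun h => hls' h.symm
        simp [h2]
      simp [hls', hbe]
  · have hstate1 : ((List.map (fun ℓ => PySem.Dict.counter (E ℓ)) (List.range 10)).modify
        p.toList.length fun d => d.modify (dsum p.toList) 0 fun x => x + 1)
        = (List.range 10).map (fun ℓ =>
            PySem.Dict.counter (if ℓ = p.toList.length then E ℓ ++ [dsum p.toList] else E ℓ)) :=
      incr_rangemap E _ hs10 _
    show List.foldl _ ((List.map (fun ℓ => PySem.Dict.counter (E ℓ)) (List.range 10)).modify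
        p.toList.length fun d => d.modify (dsum p.toList) 0 fun x => x + 1) _ = _
    rw [hstate1]
    have hfd : PySem.Int.floordiv ((p.toList.length : Int) + 1) 2
        = (((p.toList.length + 1) / 2 : Nat) : Int) := by
      have h1 : ((p.toList.length : Int) + 1) = (((p.toList.length + 1 : Nat)) : Int) := by push_cast; ring
      rw [h1, show (2 : Int) = ((2 : Nat) : Int) from rfl, PySem.Int.floordiv_natCast]
    rw [hfd, PySem.List.pyRange_one]
    have htn : ((((p.toList.length + 1) / 2 : Nat) : Int) - 1).toNat = (p.toList.length + 1) / 2 - 1 := by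
      omega
    rw [htn, List.foldl_map]
    refine Eq.trans (foldl_two_incr (List.range ((p.toList.length + 1) / 2 - 1))
      (fun j => (((p.toList.length : Int) - 2 * (1 + (j : Int))).toNat,
        dsum p.toList - 2 * PySem.List.pyGetD ((List.range (p.toList.length + 1)).map (dsT p.toList)) (1 + (j : Int)) 0))
      (fun j => (((p.toList.length : Int) - 2 * (1 + (j : Int))).toNat,
        2 * PySem.List.pyGetD ((List.range (p.toList.length + 1)).map (dsT p.toList)) ((p.toList.length : Int) - (1 + (j : Int))) 0 - dsum p.toList))
      _) ?_
    have hent : (List.range ((p.toList.length + 1) / 2 - 1)).flatMap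
        (fun (j : Nat) => [(((p.toList.length : Int) - 2 * (1 + (j : Int))).toNat,
            dsum p.toList - 2 * PySem.List.pyGetD ((List.range (p.toList.length + 1)).map (dsT p.toList)) (1 + (j : Int)) 0),
          (((p.toList.length : Int) - 2 * (1 + (j : Int))).toNat,
            2 * PySem.List.pyGetD ((List.range (p.toList.length + 1)).map (dsT p.toList)) ((p.toList.length : Int) - (1 + (j : Int))) 0 - dsum p.toList)])
        = (List.range ((p.toList.length + 1) / 2 - 1)).flatMap (fun j =>
            [(p.toList.length - 2 * (j + 1), dsum p.toList - 2 * dsT p.toList (j + 1)),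
             (p.toList.length - 2 * (j + 1), 2 * dsT p.toList (p.toList.length - (j + 1)) - dsum p.toList)]) := by
      rw [List.flatMap_def, List.flatMap_def]
      apply congrArg
      apply List.map_congr_left
      intro j hj
      have hj' := List.mem_range.mp hj
      have hidx : (((p.toList.length : Int)) - 2 * (1 + (j : Int))).toNat = p.toList.length - 2 * (j + 1) := by
        omega
      have hc1 : (1 + (j : Int)) = (((j + 1 : Nat)) : Int) := by push_cast; ring
      have hc2 : ((p.toList.length : Int) - (((j + 1 : Nat)) : Int)) = (((p.toList.length - (j + 1) : Nat)) : Int) := by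
        omega
      rw [hidx, hc1, hc2, prefix_get _ _ (by omega), prefix_get _ _ (by omega)]
    rw [hent]
    have hb : ∀ e ∈ (List.range ((p.toList.length + 1) / 2 - 1)).flatMap (fun j =>
        [(p.toList.length - 2 * (j + 1), dsum p.toList - 2 * dsT p.toList (j + 1)),
         (p.toList.length - 2 * (j + 1), 2 * dsT p.toList (p.toList.length - (j + 1)) - dsum p.toList)]),
        e.1 < 10 :=
      fun e he => pe_bounds p.toList hp9 e (List.mem_cons_of_mem _ he)
    rw [applyEntries _ _ hb]
    show _ = (List.range 10).map (fun ℓ => PySem.Dict.counter (E ℓ ++ evals ℓ [p.toList]))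
    apply List.map_congr_left
    intro ℓ _
    congr 1
    unfold evals
    simp only [List.flatMap_cons, List.flatMap_nil, List.append_nil]
    rw [show pe p.toList = (p.toList.length, dsum p.toList) :: (List.range ((p.toList.length + 1) / 2 - 1)).flatMap (fun j =>
        [(p.toList.length - 2 * (j + 1), dsum p.toList - 2 * dsT p.toList (j + 1)),
         (p.toList.length - 2 * (j + 1), 2 * dsT p.toList (p.toList.length - (j + 1)) - dsum p.toList)]) from rfl]
    rw [List.filter_cons]
    by_cases hls : ℓ = p.toList.length
    · subst hls
      simp
    · have hls' : ¬ ℓ = p.length := by rw [← String.length_toList]; exact hls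
      have hbe : (p.length == ℓ) = false := by
        have h2 : p.length ≠ ℓ := fun h => hls' h.symm
        simp [h2]
      simp [hls', hbe]

theorem fold_inv (L : List String) (W E : Nat → List Int)
    (h : ∀ p ∈ L, p.toList.length ≤ 9) :
    L.foldl
      (fun (wp : List (PySem.Dict Int Int) × List (PySem.Dict Int Int)) piece =>
        let cs := piece.toList
        let s : Nat := cs.length
        let prefix_ := cs.foldl
          (fun pre c => pre ++ [PySem.List.pyGetD pre (-1) 0 + ((c.toNat : Int) - 48)])
          ([0] : List Int)
        let total := PySem.List.pyGetD prefix_ (s : Int) 0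
        let whole := wp.1.modify s (fun d => d.modify total 0 (· + 1))
        let part := wp.2.modify s (fun d => d.modify total 0 (· + 1))
        let part := (PySem.List.pyRange 1 (PySem.Int.floordiv ((s : Int) + 1) 2) 1).foldl
          (fun part k =>
            let part := part.modify ((s : Int) - 2 * k).toNat
              (fun d => d.modify (total - 2 * PySem.List.pyGetD prefix_ k 0) 0 (· + 1))
            part.modify ((s : Int) - 2 * k).toNat
              (fun d => d.modify (2 * PySem.List.pyGetD prefix_ ((s : Int) - k) 0 - total) 0 (· + 1)))
          part
        (whole, part))
      ((List.range 10).map (fun ℓ => PySem.Dict.counter (W ℓ)),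
       (List.range 10).map (fun ℓ => PySem.Dict.counter (E ℓ)))
    = ((List.range 10).map (fun ℓ => PySem.Dict.counter (W ℓ ++ wvals ℓ (xss L))),
       (List.range 10).map (fun ℓ => PySem.Dict.counter (E ℓ ++ evals ℓ (xss L)))) := by
  induction L generalizing W E with
  | nil => simp [xss, wvals, evals]
  | cons p rest ih =>
    rw [List.foldl_cons]
    refine Eq.trans (congrArg (fun st => List.foldl _ st rest)
      (piece_step p W E (h p (List.mem_cons_self ..)))) ?_
    beta_reduce
    rw [ih _ _ (fun q hq => h q (List.mem_cons_of_mem _ hq))]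
    have hx : xss (p :: rest) = p.toList :: xss rest := rfl
    rw [Prod.mk.injEq]
    refine ⟨?_, ?_⟩ <;>
      (apply List.map_congr_left; intro ℓ _; congr 1; rw [List.append_assoc, hx])
    · rw [wvals_cons]
    · rw [evals_cons]

theorem evals_count (ℓ : Nat) (v : Int) (xs : List (List Char)) :
    (evals ℓ xs).count v = (xs.flatMap pe).count (ℓ, v) := by
  unfold evals
  rw [List.count_eq_countP, List.count_eq_countP, List.countP_map, List.countP_filter]
  apply List.countP_congr
  intro e _
  constructor
  · intro he
    have hvl : e.2 = v ∧ e.1 = ℓ := by simpa using he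
    have : e = (ℓ, v) := by
      rw [Prod.ext_iff]
      exact ⟨hvl.2, hvl.1⟩
    simp [this]
  · intro he
    have : e = (ℓ, v) := by simpa using he
    subst this
    simp

theorem sum_filter_guard (xs : List (List Char)) (F : List Char → Int) :
    ((xs.filter (fun x => x ≠ [])).map F).sum
      = (xs.map (fun x => if x = [] then 0 else F x)).sum := by
  induction xs with
  | nil => rfl
  | cons a r ih =>
    rw [List.filter_cons]
    by_cases hae : a = []
    · subst hae
      rw [if_neg (by simp), ih, List.map_cons, List.sum_cons, if_pos rfl, zero_add]
    · rw [if_pos (by simp [hae]), List.map_cons, List.sum_cons, ih,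
        List.map_cons, List.sum_cons, if_neg hae]

theorem partition_sum (xs : List (List Char)) (F : List Char → Int)
    (h : ∀ x ∈ xs, x.length ≤ 9) :
    ((List.range 9).map (fun j =>
      ((xs.filter (fun x => x.length == 1 + j)).map F).sum)).sum
      = ((xs.filter (fun x => x ≠ [])).map F).sum := by
  induction xs with
  | nil =>
    rw [List.map_congr_left (g := fun _ => (0 : Int)) (by intro j _; simp),
      PySem.List.sum_map_const_int]
    simp
  | cons a r ih =>
    have ha := h a (List.mem_cons_self ..)
    by_cases hae : a = []
    · have hpt : ∀ j ∈ List.range 9,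
          (((a :: r).filter (fun x => x.length == 1 + j)).map F).sum
          = (fun j => ((r.filter (fun x => x.length == 1 + j)).map F).sum) j := by
        intro j _
        rw [List.filter_cons]
        have : (a.length == 1 + j) = false := by subst hae; simp; omega
        rw [this]
        simp
      rw [List.map_congr_left hpt, ih (fun x hx => h x (List.mem_cons_of_mem _ hx)),
        List.filter_cons]
      have : ¬ (a ≠ []) := by simp [hae]
      simp [hae]
    · have ha1 : 1 ≤ a.length := by
        cases a with
        | nil => exact absurd rfl hae
        | cons c cs => simp
      have hpt : ∀ j ∈ List.range 9,
          (((a :: r).filter (fun x => x.length == 1 + j)).map F).sum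
          = (fun j => (if j = a.length - 1 then F a else 0)
              + ((r.filter (fun x => x.length == 1 + j)).map F).sum) j := by
        intro j _
        rw [List.filter_cons]
        by_cases hq : (a.length == 1 + j) = true
        · have hq' : a.length = 1 + j := by simpa using hq
          have hj : j = a.length - 1 := by omega
          subst hj
          rw [if_pos hq]
          simp
        · have hq' : ¬ a.length = 1 + j := by simpa using hq
          have hj : ¬ j = a.length - 1 := by omega
          simp [hq', hj]
      rw [List.map_congr_left hpt, PySem.List.sum_map_add_int,
        ih (fun x hx => h x (List.mem_cons_of_mem _ hx)),
        sum_map_ite_mem _ _ _ List.nodup_range (by rw [List.mem_range]; omega),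
        List.filter_cons]
      rw [if_pos (by simp [hae]), List.map_cons, List.sum_cons]

theorem A_char (N : Int) (L : List String)
    (h : ∀ p ∈ L, p.toList.length ≤ 9) :
    solve N L = ((xss L).map (fun x => if x = [] then 0 else
      ((xss L).map (fun y => ((pe y).count (x.length, dsum x) : Int))).sum)).sum := by
  unfold solve
  have hrep : (List.replicate 10 (PySem.Dict.empty : PySem.Dict Int Int),
        List.replicate 10 (PySem.Dict.empty : PySem.Dict Int Int))
      = ((List.range 10).map (fun ℓ => PySem.Dict.counter ((fun _ : Nat => ([] : List Int)) ℓ)),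
         (List.range 10).map (fun ℓ => PySem.Dict.counter ((fun _ : Nat => ([] : List Int)) ℓ))) := by
    rw [show (fun ℓ : Nat => PySem.Dict.counter ((fun _ : Nat => ([] : List Int)) ℓ))
        = (Function.const Nat (PySem.Dict.empty : PySem.Dict Int Int)) from rfl]
    rw [List.map_const, List.length_range]
  rw [hrep, fold_inv L _ _ h]
  simp only [List.nil_append]
  rw [PySem.List.pyRange_one, show ((10 : Int) - 1).toNat = 9 from rfl, List.foldl_map]
  have hbody : ∀ (r : Int), ∀ j ∈ List.range 9,
      ((PySem.List.pyGetD ((List.range 10).map (fun ℓ => PySem.Dict.counter (wvals ℓ (xss L))))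
          (1 + (j : Int)) PySem.Dict.empty).items.foldl
        (fun result sv => result + sv.2 *
          (PySem.List.pyGetD ((List.range 10).map (fun ℓ => PySem.Dict.counter (evals ℓ (xss L))))
            (1 + (j : Int)) PySem.Dict.empty).getD sv.1 0) r)
      = (fun (r : Int) (j : Nat) => r +
          (((xss L).filter (fun x => x.length == 1 + j)).map
            (fun x => ((((xss L).flatMap pe).count (x.length, dsum x) : Int)))).sum) r j := by
    intro r j hj
    have hj' := List.mem_range.mp hj
    have hcast : ((1 : Int) + (j : Int)) = (((1 + j : Nat)) : Int) := by push_cast; ring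
    rw [hcast, PySem.List.pyGetD_natCast, PySem.List.pyGetD_natCast,
      PySem.List.getD_map_range _ _ _ _ (by omega), PySem.List.getD_map_range _ _ _ _ (by omega)]
    rw [PySem.List.foldl_add, PySem.Dict.items_counter, List.map_map]
    have hcomp : ((fun sv : Int × Int => sv.2 * (PySem.Dict.counter (evals (1 + j) (xss L))).getD sv.1 0)
          ∘ (fun k => (k, ((wvals (1 + j) (xss L)).count k : Int))))
        = fun k => ((wvals (1 + j) (xss L)).count k : Int)
            * (PySem.Dict.counter (evals (1 + j) (xss L))).getD k 0 := rfl
    rw [hcomp, sum_count_dedup _ _ _ (PySem.Set.nodup_ofList _)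
      (fun x hx => (PySem.Set.mem_ofList _ x).mpr hx)]
    congr 1
    unfold wvals
    rw [List.map_map]
    apply congrArg
    apply List.map_congr_left
    intro x hx
    have hlen : x.length = 1 + j := by
      have := (List.mem_filter.mp hx).2
      simpa using this
    simp only [Function.comp]
    rw [PySem.Dict.getD_counter, evals_count, hlen]
  rw [PySem.List.foldl_congr_mem _ _ _ 0 hbody, PySem.List.foldl_add, zero_add]
  have hlens : ∀ x ∈ xss L, x.length ≤ 9 := by
    intro x hx
    obtain ⟨p, hp, rfl⟩ := List.mem_map.mp hx
    exact h p hp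
  rw [partition_sum (xss L) _ hlens, sum_filter_guard]
  apply congrArg
  apply List.map_congr_left
  intro x _
  by_cases hxe : x = []
  · rw [if_pos hxe, if_pos hxe]
  · rw [if_neg hxe, if_neg hxe, List.count_flatMap, Nat.cast_list_sum, List.map_map]
    rfl

theorem B_char (N : Int) (L : List String) :
    solve_alt N L = ((xss L).map (fun x => ((xss L).map (fun y => luckyN x y)).sum)).sum := by
  unfold solve_alt
  have hinner : ∀ (x : String) (c : Int),
      L.foldl (fun count y =>
        if y.toList = [] then count
        else
          let s := x.toList ++ y.toList
          if s.length % 2 = 0 then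
            let h := s.length / 2
            if dsum (s.take h) = dsum (s.drop h) then count + 1 else count
          else count) c
      = c + ((xss L).map (fun y => if y = [] then 0 else luckyI x.toList y)).sum := by
    intro x c
    have hfun : (fun (count : Int) (y : String) =>
        if y.toList = [] then count
        else
          let s := x.toList ++ y.toList
          if s.length % 2 = 0 then
            let h := s.length / 2
            if dsum (s.take h) = dsum (s.drop h) then count + 1 else count
          else count)
        = fun count y => count + (if y.toList = [] then 0 else luckyI x.toList y.toList) := by
      funext count y
      by_cases hye : y.toList = []
      · simp [hye]
      · simp only [hye, if_false]
        simp only [luckyI, List.length_append, String.length_toList]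
        by_cases hev : (x.length + y.length) % 2 = 0
        · by_cases hds : dsum ((x.toList ++ y.toList).take ((x.length + y.length) / 2))
              = dsum ((x.toList ++ y.toList).drop ((x.length + y.length) / 2))
          · simp [hev, hds]
          · simp [hev, hds]
        · simp [hev]
    rw [hfun, PySem.List.foldl_add]
    unfold xss
    rw [List.map_map]
    rfl
  have houter : (fun (count : Int) (x : String) =>
      if x.toList = [] then count
      else L.foldl (fun count y =>
        if y.toList = [] then count
        else
          let s := x.toList ++ y.toList
          if s.length % 2 = 0 then
            let h := s.length / 2
            if dsum (s.take h) = dsum (s.drop h) then count + 1 else count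
          else count) count)
      = fun count x => count + ((xss L).map (fun y => luckyN x.toList y)).sum := by
    funext c x
    by_cases hxe : x.toList = []
    · rw [if_pos hxe]
      have : ((xss L).map (fun y => luckyN x.toList y)).sum = 0 := by
        rw [List.map_congr_left (g := fun _ => (0 : Int)) (by intro y _; simp [luckyN, hxe]),
          PySem.List.sum_map_const_int, mul_zero]
      rw [this, add_zero]
    · rw [if_neg hxe, hinner x c]
      congr 1
      apply congrArg
      apply List.map_congr_left
      intro y _
      rw [luckyN, if_neg hxe]
  rw [houter, PySem.List.foldl_add, zero_add]
  unfold xss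
  rw [List.map_map]
  rfl

theorem count_int {α : Type} [BEq α] [LawfulBEq α] [DecidableEq α] (l : List α) (a : α) :
    ((l.count a : Int)) = (l.map (fun e => if e = a then (1 : Int) else 0)).sum := by
  induction l with
  | nil => simp
  | cons b t ih =>
    rw [List.count_cons]
    push_cast
    rw [ih, List.map_cons, List.sum_cons]
    by_cases hba : b = a
    · simp [hba, add_comm]
    · simp [hba]

theorem sum_flatMap_int {α : Type} (l : List α) (f : α → List Int) :
    (l.flatMap f).sum = (l.map (fun k => (f k).sum)).sum := by
  induction l with
  | nil => simp
  | cons b t ih => simp [List.flatMap_cons, List.sum_append, ih]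

theorem pe_count (x y : List Char) (hx : x ≠ []) :
    ((pe y).count (x.length, dsum x) : Int)
      = (if x.length ≤ y.length then luckyI x y else 0)
        + (if x.length < y.length then luckyI y x else 0) := by
  have hn1 : 1 ≤ x.length := List.length_pos_of_ne_nil hx
  rw [pe, count_int, List.map_cons, List.sum_cons, List.map_flatMap, sum_flatMap_int]
  by_cases hns : x.length = y.length
  · -- equal lengths: only the head entry can match
    have hz : ∀ j ∈ List.range ((y.length + 1) / 2 - 1),
        (List.map (fun e => if e = (x.length, dsum x) then (1 : Int) else 0)
          [(y.length - 2 * (j + 1), dsum y - 2 * dsT y (j + 1)),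
           (y.length - 2 * (j + 1), 2 * dsT y (y.length - (j + 1)) - dsum y)]).sum = (fun _ => (0 : Int)) j := by
      intro j hj
      have h1 : (y.length - 2 * (j + 1), dsum y - 2 * dsT y (j + 1)) ≠ (x.length, dsum x) := by
        intro hEq; have := congrArg Prod.fst hEq; simp at this; omega
      have h2 : (y.length - 2 * (j + 1), 2 * dsT y (y.length - (j + 1)) - dsum y) ≠ (x.length, dsum x) := by
        intro hEq; have := congrArg Prod.fst hEq; simp at this; omega
      simp [h1, h2]
    rw [List.map_congr_left hz, PySem.List.sum_map_const_int, mul_zero, add_zero]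
    have hle : x.length ≤ y.length := le_of_eq hns
    have hnlt : ¬ x.length < y.length := by omega
    have hev : (x.length + y.length) % 2 = 0 := by omega
    have hh : (x.length + y.length) / 2 = x.length := by omega
    have htake : (x ++ y).take x.length = x := List.take_left ..
    have hdrop : (x ++ y).drop x.length = y := List.drop_left ..
    rw [if_pos hle, if_neg hnlt, add_zero]
    simp only [luckyI, hh, htake, hdrop, hev, true_and]
    by_cases hd : dsum x = dsum y
    · simp [hns, hd]
    · have : dsum y ≠ dsum x := fun h => hd h.symm
      simp [Prod.ext_iff, hd, this]
  · have hhead : ((y.length, dsum y) : Nat × Int) ≠ (x.length, dsum x) := by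
      intro hEq; have := congrArg Prod.fst hEq; simp at this; omega
    rw [if_neg hhead, zero_add]
    by_cases hlt : x.length < y.length ∧ (y.length - x.length) % 2 = 0
    · obtain ⟨hlt1, hpar⟩ := hlt
      have hm1 : 1 ≤ (y.length - x.length) / 2 := by omega
      have hmem : (y.length - x.length) / 2 - 1 ∈ List.range ((y.length + 1) / 2 - 1) := by
        rw [List.mem_range]; omega
      have hpt : ∀ j ∈ List.range ((y.length + 1) / 2 - 1),
          (List.map (fun e => if e = (x.length, dsum x) then (1 : Int) else 0)
            [(y.length - 2 * (j + 1), dsum y - 2 * dsT y (j + 1)),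
             (y.length - 2 * (j + 1), 2 * dsT y (y.length - (j + 1)) - dsum y)]).sum
          = (fun j => if j = (y.length - x.length) / 2 - 1 then
              ((if dsum y - 2 * dsT y (j + 1) = dsum x then (1 : Int) else 0)
               + (if 2 * dsT y (y.length - (j + 1)) - dsum y = dsum x then (1 : Int) else 0)) else 0) j := by
        intro j hj
        have hj' := List.mem_range.mp hj
        by_cases hjm : j = (y.length - x.length) / 2 - 1
        · subst hjm
          have hlen : y.length - 2 * ((y.length - x.length) / 2 - 1 + 1) = x.length := by omega
          simp [Prod.ext_iff, hlen]
        · have h1 : y.length - 2 * (j + 1) ≠ x.length := by omega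
          simp [hjm, Prod.ext_iff, h1]
      rw [List.map_congr_left hpt,
        sum_map_ite_mem _ _ _ List.nodup_range hmem]
      have hmm : (y.length - x.length) / 2 - 1 + 1 = (y.length - x.length) / 2 := by omega
      rw [hmm]
      have hle : x.length ≤ y.length := le_of_lt hlt1
      rw [if_pos hle, if_pos hlt1]
      -- luckyI x y
      have hev : (x.length + y.length) % 2 = 0 := by omega
      have hh : (x.length + y.length) / 2 = x.length + (y.length - x.length) / 2 := by omega
      have htake : (x ++ y).take (x.length + (y.length - x.length) / 2)
          = x ++ y.take ((y.length - x.length) / 2) := by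
        rw [List.take_append, List.take_of_length_le (by omega)]
        congr 2
        omega
      have hdrop : (x ++ y).drop (x.length + (y.length - x.length) / 2)
          = y.drop ((y.length - x.length) / 2) := by
        rw [List.drop_append, List.drop_of_length_le (by omega), List.nil_append]
        congr 1
        omega
      have hsplit : dsT y ((y.length - x.length) / 2) + dsum (y.drop ((y.length - x.length) / 2)) = dsum y := by
        rw [dsT, ← dsum_append, List.take_append_drop]
      have hT : dsT y ((y.length - x.length) / 2) = dsum (List.take ((y.length - x.length) / 2) y) := rfl
      rw [hT] at hsplit
      have hl1 : luckyI x y = (if dsum y - 2 * dsT y ((y.length - x.length) / 2) = dsum x then (1 : Int) else 0) := by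
        rw [luckyI, hh, htake, hdrop, dsum_append, hT]
        by_cases hc : dsum x + dsum (List.take ((y.length - x.length) / 2) y)
            = dsum (List.drop ((y.length - x.length) / 2) y)
        · rw [if_pos ⟨hev, hc⟩, if_pos (by omega)]
        · rw [if_neg (fun h => hc h.2), if_neg (by omega)]
      -- luckyI y x
      have hev' : (y.length + x.length) % 2 = 0 := by omega
      have hh' : (y.length + x.length) / 2 = y.length - (y.length - x.length) / 2 := by omega
      have htake' : (y ++ x).take (y.length - (y.length - x.length) / 2)
          = y.take (y.length - (y.length - x.length) / 2) :=
        List.take_append_of_le_length (by omega)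
      have hdrop' : (y ++ x).drop (y.length - (y.length - x.length) / 2)
          = y.drop (y.length - (y.length - x.length) / 2) ++ x :=
        List.drop_append_of_le_length (by omega)
      have hsplit' : dsT y (y.length - (y.length - x.length) / 2)
          + dsum (y.drop (y.length - (y.length - x.length) / 2)) = dsum y := by
        rw [dsT, ← dsum_append, List.take_append_drop]
      have hT' : dsT y (y.length - (y.length - x.length) / 2)
          = dsum (List.take (y.length - (y.length - x.length) / 2) y) := rfl
      rw [hT'] at hsplit'
      have hl2 : luckyI y x = (if 2 * dsT y (y.length - (y.length - x.length) / 2) - dsum y = dsum x then (1 : Int) else 0) := by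
        rw [luckyI, hh', htake', hdrop', dsum_append, hT']
        by_cases hc : dsum (List.take (y.length - (y.length - x.length) / 2) y)
            = dsum (List.drop (y.length - (y.length - x.length) / 2) y) + dsum x
        · rw [if_pos ⟨hev', hc⟩, if_pos (by omega)]
        · rw [if_neg (fun h => hc h.2), if_neg (by omega)]
      rw [hl1, hl2]
    · -- no split point can match, and no glued ticket is lucky
      have hz : ∀ j ∈ List.range ((y.length + 1) / 2 - 1),
          (List.map (fun e => if e = (x.length, dsum x) then (1 : Int) else 0)
            [(y.length - 2 * (j + 1), dsum y - 2 * dsT y (j + 1)),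
             (y.length - 2 * (j + 1), 2 * dsT y (y.length - (j + 1)) - dsum y)]).sum = (fun _ => (0 : Int)) j := by
        intro j hj
        have hj' := List.mem_range.mp hj
        have h1 : y.length - 2 * (j + 1) ≠ x.length := by omega
        simp [Prod.ext_iff, h1]
      rw [List.map_congr_left hz, PySem.List.sum_map_const_int, mul_zero]
      have h0 : (if x.length ≤ y.length then luckyI x y else 0) = 0 := by
        by_cases hle : x.length ≤ y.length
        · rw [if_pos hle, luckyI, if_neg]
          rintro ⟨he, -⟩
          omega
        · rw [if_neg hle]
      have h0' : (if x.length < y.length then luckyI y x else 0) = 0 := by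
        by_cases hle : x.length < y.length
        · rw [if_pos hle, luckyI, if_neg]
          rintro ⟨he, -⟩
          omega
        · rw [if_neg hle]
      rw [h0, h0']
      ring

-- ===== VERDICT (by name: the statement is the Claim_ definition above) =====
theorem solve_spec : Claim_equal_solve := by
  intro N L _ hPre
  unfold Spec_solve
  rw [A_char N L hPre, B_char N L]
  calc ((xss L).map (fun x => if x = [] then (0 : Int) else
        ((xss L).map (fun y => ((pe y).count (x.length, dsum x) : Int))).sum)).sum
      = ((xss L).map (fun x => ((xss L).map (fun y =>
          (if x = [] then (0 : Int) else if x.length ≤ y.length then luckyI x y else 0)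
          + (if x = [] then (0 : Int) else if x.length < y.length then luckyI y x else 0))).sum)).sum := by
        apply congrArg
        apply List.map_congr_left
        intro a _
        by_cases hae : a = []
        · rw [if_pos hae,
            List.map_congr_left (g := fun _ => (0 : Int)) (by intro b _; simp [hae]),
            PySem.List.sum_map_const_int, mul_zero]
        · rw [if_neg hae]
          apply congrArg
          apply List.map_congr_left
          intro b _
          rw [pe_count a b hae, if_neg hae, if_neg hae]
    _ = ((xss L).map (fun x => ((xss L).map (fun y =>
          (if x = [] then (0 : Int) else if x.length ≤ y.length then luckyI x y else 0))).sum)).sum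
        + ((xss L).map (fun x => ((xss L).map (fun y =>
          (if x = [] then (0 : Int) else if x.length < y.length then luckyI y x else 0))).sum)).sum := by
        rw [← PySem.List.sum_map_add_int]
        apply congrArg
        apply List.map_congr_left
        intro a _
        rw [← PySem.List.sum_map_add_int]
    _ = ((xss L).map (fun x => ((xss L).map (fun y => luckyN x y)).sum)).sum := by
        rw [sum_swap (f := fun x y => (if x = [] then (0 : Int) else if x.length < y.length then luckyI y x else 0))]
        rw [← PySem.List.sum_map_add_int]
        apply congrArg
        apply List.map_congr_left
        intro a _
        rw [← PySem.List.sum_map_add_int]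
        apply congrArg
        apply List.map_congr_left
        intro b _
        by_cases hae : a = []
        · have hb : ¬ b.length < a.length := by
            rw [hae]
            simp
          by_cases hbe : b = []
          · simp [luckyN, hae, hbe]
          · simp [luckyN, hae, hbe]
        · have ha1 : 1 ≤ a.length := List.length_pos_of_ne_nil hae
          by_cases hbe : b = []
          · simp [luckyN, hae, hbe]
          · rw [if_neg hae, if_neg hbe]
            unfold luckyN
            rw [if_neg hae, if_neg hbe]
            by_cases hab : a.length ≤ b.length
            · have : ¬ b.length < a.length := by omega
              simp [hab, this]
            · have : b.length < a.length := by omega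
              simp [hab, this]
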